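-- pv_equiv track=rewrite | github.com/wouk1805/medreport | rich_text_widget.py | _get_markdown_header_level
-- ===== SOURCE A (Python) =====
-- def _get_markdown_header_level(line):
--     """Get the header level based on # symbols (0 = not a header)"""
--     stripped = line.strip()
--     if not stripped.startswith('#'):
--         return 0
--
--     # Count consecutive # symbols at the start
--     level = 0
--     for char in stripped:
--         if char == '#':
--             level += 1
--         else:
--             break
--
--     # Must be followed by space or end of line to be valid header
--     if level < len(stripped) and stripped[level] != ' ':
--         return 0
--
--     return level
-- ===== SOURCE B (Python) =====
-- def _get_markdown_header_level(line):
--     """Header level = length of the first word, when that word is all '#'."""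
--     stripped = line.strip()
--     cut = stripped.find(' ')
--     first = stripped if cut < 0 else stripped[:cut]
--     if first and first == '#' * len(first):
--         return len(first)
--     return 0
-- ===== Notes on version B (the rewrite author's own statement) =====
-- stated objective: alternative
-- what changed: B extracts the first space-delimited word (find + slice) and tests whether it is a nonempty all-hash run, instead of A's char-by-char counting loop plus startswith guard and index check.
import Mathlib
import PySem

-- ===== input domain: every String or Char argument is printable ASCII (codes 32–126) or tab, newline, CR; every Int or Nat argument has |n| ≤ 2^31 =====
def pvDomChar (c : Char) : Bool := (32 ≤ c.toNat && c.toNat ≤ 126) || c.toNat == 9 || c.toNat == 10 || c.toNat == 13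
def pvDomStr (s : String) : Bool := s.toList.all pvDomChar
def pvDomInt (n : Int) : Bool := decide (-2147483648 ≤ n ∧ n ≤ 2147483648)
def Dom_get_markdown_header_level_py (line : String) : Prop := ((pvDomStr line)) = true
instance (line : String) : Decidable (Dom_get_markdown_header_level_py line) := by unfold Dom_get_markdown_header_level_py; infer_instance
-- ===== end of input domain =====

-- B replaces A's char-counting loop and index check by extracting the first word (find + slice)
-- and comparing it to a same-length run of hash marks; same result, no speed claim (objective: alternative).

-- ===== PORT A =====
-- A's loop: for char in stripped: if char == '#': level += 1 else: break
def pvCountHashes : List Char → Nat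
  | [] => 0
  | c :: cs => if c = '#' then pvCountHashes cs + 1 else 0

def get_markdown_header_level_py (line : String) : Int :=
  let stripped := (PySem.Str.strip line).toList
  if !(PySem.Chars.startswith stripped ['#']) then 0
  else
    let level := pvCountHashes stripped
    -- 'level < len(stripped) and stripped[level] != " "': the index access is guarded in-range,
    -- so List.getD is exact here
    if level < stripped.length ∧ stripped.getD level ' ' ≠ ' ' then 0
    else (level : Int)

-- ===== PORT B =====
def get_markdown_header_level_py_alt (line : String) : Int :=
  let stripped := (PySem.Str.strip line).toList
  let cut := PySem.Chars.find stripped [' ']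
  let first := if cut < 0 then stripped else PySem.List.slice stripped none (some cut)
  if first ≠ [] ∧ first = List.replicate first.length '#' then (first.length : Int) else 0

-- ===== PRECONDITION & SPEC =====
def Spec_get_markdown_header_level_py (line : String) (out : Int) : Prop := out = get_markdown_header_level_py_alt line
instance (line : String) (out : Int) : Decidable (Spec_get_markdown_header_level_py line out) := by unfold Spec_get_markdown_header_level_py; infer_instance

-- ===== CLAIM (what is proved, stated in full; the proofs are below) =====
def Claim_equal_get_markdown_header_level_py : Prop := ∀ (line : String), Dom_get_markdown_header_level_py line → Spec_get_markdown_header_level_py line (get_markdown_header_level_py line)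

-- ===== LEMMAS AND PROOFS =====

-- A's counting loop counts the leading run of '#'
theorem pvCountHashes_eq (cs : List Char) :
    pvCountHashes cs = (cs.takeWhile (· == '#')).length := by
  induction cs with
  | nil => rfl
  | cons c cs ih =>
    by_cases h : c = '#' <;> simp [pvCountHashes, h, ih]

-- B's find(' ') locates the end of the first word
theorem pv_find_go_space (cs : List Char) (k : Nat) :
    PySem.Chars.find.go [' '] cs k =
      if ' ' ∈ cs then (((k + (cs.takeWhile (· != ' ')).length : Nat) : Int)) else -1 := by
  induction cs generalizing k with
  | nil => simp [PySem.Chars.find.go]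
  | cons c cs ih =>
    by_cases h : c = ' '
    · subst h
      rw [show PySem.Chars.find.go [' '] (' ' :: cs) k = (k : Int) by
        rw [PySem.Chars.find.go]; simp [List.isPrefixOf]]
      rw [if_pos (List.mem_cons_self), List.takeWhile_cons]
      simp
    · have hb : [' '].isPrefixOf (c :: cs) = false := by
        simp only [List.isPrefixOf, Bool.and_eq_false_iff]
        exact Or.inl (by simp; exact fun he => h he.symm)
      rw [show PySem.Chars.find.go [' '] (c :: cs) k = PySem.Chars.find.go [' '] cs (k + 1) by
        rw [PySem.Chars.find.go]; simp [hb]]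
      rw [ih]
      have hne : (c != ' ') = true := by simp [h]
      by_cases hm : ' ' ∈ cs
      · rw [if_pos hm, if_pos (by simp [hm]), List.takeWhile_cons, hne]
        simp only [if_true, List.length_cons]
        push_cast; ring
      · rw [if_neg hm, if_neg (by simp [List.mem_cons, hm]; exact fun he => h he.symm)]

-- a prefix of cs of its own length is recovered by take
theorem pv_take_takeWhile (cs : List Char) (p : Char → Bool) :
    cs.take (cs.takeWhile p).length = cs.takeWhile p :=
  ((List.prefix_iff_eq_take).1 (List.takeWhile_prefix p)).symm

-- B's 'first' is the first space-delimited word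
theorem pv_first_eq (cs : List Char) :
    (if PySem.Chars.find cs [' '] < 0 then cs
     else PySem.List.slice cs none (some (PySem.Chars.find cs [' ']))) =
      cs.takeWhile (· != ' ') := by
  unfold PySem.Chars.find
  rw [pv_find_go_space cs 0]
  by_cases hm : ' ' ∈ cs
  · rw [if_pos hm, if_neg (by simp), PySem.List.slice_to _ (by simp)]
    simp [pv_take_takeWhile]
  · rw [if_neg hm, if_pos (by norm_num)]
    symm
    exact List.takeWhile_eq_self_iff.2 (fun c hc => by
      simp only [bne_iff_ne, ne_eq]; exact fun h => hm (h ▸ hc))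

-- the first element surviving dropWhile fails the predicate
theorem pv_dropWhile_head (p : Char → Bool) (cs : List Char) (d : Char) (r : List Char)
    (h : cs.dropWhile p = d :: r) : p d = false := by
  induction cs with
  | nil => simp at h
  | cons c cs ih =>
    rw [List.dropWhile_cons] at h
    by_cases hc : p c
    · rw [if_pos hc] at h; exact ih h
    · rw [if_neg hc] at h
      cases h
      simpa using hc

-- core equivalence on the stripped character list
theorem pv_core (cs : List Char) :
    (if !(PySem.Chars.startswith cs ['#']) then 0
     else
       let level := pvCountHashes cs
       if level < cs.length ∧ cs.getD level ' ' ≠ ' ' then 0 else (level : Int)) =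
    (let cut := PySem.Chars.find cs [' ']
     let first := if cut < 0 then cs else PySem.List.slice cs none (some cut)
     if first ≠ [] ∧ first = List.replicate first.length '#' then (first.length : Int) else 0) := by
  simp only []
  rw [pv_first_eq cs]
  obtain ⟨k, htw⟩ : ∃ k, cs.takeWhile (· == '#') = List.replicate k '#' := by
    refine ⟨(cs.takeWhile (· == '#')).length, ?_⟩
    rw [List.eq_replicate_iff]
    exact ⟨rfl, fun b hb => by simpa using List.mem_takeWhile_imp hb⟩
  have hrep : ∀ n, (List.replicate n '#').takeWhile (· != ' ') = List.replicate n '#' :=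
    fun n => List.takeWhile_eq_self_iff.2 (fun c hc => by
      rw [List.eq_of_mem_replicate hc]; decide)
  rw [pvCountHashes_eq, htw, List.length_replicate]
  cases ht : cs.dropWhile (· == '#') with
  | nil =>
    have hcs : cs = List.replicate k '#' := by
      conv_lhs => rw [← List.takeWhile_append_dropWhile (p := (· == '#')) (l := cs)]
      rw [htw, ht, List.append_nil]
    rw [hcs]
    cases k with
    | zero => decide
    | succ k =>
      rw [show PySem.Chars.startswith (List.replicate (k+1) '#') ['#'] = true from by
        simp [PySem.Chars.startswith, List.replicate_succ, List.isPrefixOf]]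
      simp [hrep (k+1)]
  | cons d r =>
    have hd : d ≠ '#' := by simpa using pv_dropWhile_head _ cs d r ht
    have hcs : cs = List.replicate k '#' ++ d :: r := by
      conv_lhs => rw [← List.takeWhile_append_dropWhile (p := (· == '#')) (l := cs)]
      rw [htw, ht]
    rw [hcs]
    have hget : (List.replicate k '#' ++ d :: r).getD k ' ' = d := by
      rw [List.getD, List.getElem?_append_right (by simp), List.length_replicate]; simp
    have hlen : k < (List.replicate k '#' ++ d :: r).length := by simp
    have htwcs : (List.replicate k '#' ++ d :: r).takeWhile (· != ' ') =
        List.replicate k '#' ++ (d :: r).takeWhile (· != ' ') := by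
      rw [List.takeWhile_append, hrep k]
      simp
    by_cases hsp : d = ' '
    · -- '#'*k followed by a space: both sides yield k
      subst hsp
      have hfirst : (List.replicate k '#' ++ ' ' :: r).takeWhile (· != ' ') =
          List.replicate k '#' := by
        rw [htwcs, List.takeWhile_cons]; simp
      rw [hfirst]
      cases k with
      | zero =>
        rw [show PySem.Chars.startswith (List.replicate 0 '#' ++ ' ' :: r) ['#'] = false from by
          simp [PySem.Chars.startswith, List.isPrefixOf]]
        simp
      | succ k =>
        rw [show PySem.Chars.startswith (List.replicate (k+1) '#' ++ ' ' :: r) ['#'] = true from by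
          simp [PySem.Chars.startswith, List.replicate_succ, List.isPrefixOf]]
        simp
    · -- '#'*k followed by a non-space non-'#' char: both sides yield 0
      have hdw : (d != ' ') = true := by simp [hsp]
      have hmem : d ∈ (List.replicate k '#' ++ d :: r).takeWhile (· != ' ') := by
        rw [htwcs, List.takeWhile_cons, hdw]
        simp
      have hnr : ¬ ((List.replicate k '#' ++ d :: r).takeWhile (· != ' ') =
          List.replicate ((List.replicate k '#' ++ d :: r).takeWhile (· != ' ')).length '#') := by
        intro he
        exact hd (List.eq_of_mem_replicate (he ▸ hmem))
      have hB : ¬ ((List.replicate k '#' ++ d :: r).takeWhile (· != ' ') ≠ [] ∧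
          (List.replicate k '#' ++ d :: r).takeWhile (· != ' ') =
            List.replicate ((List.replicate k '#' ++ d :: r).takeWhile (· != ' ')).length '#') :=
        fun hc => hnr hc.2
      rw [if_neg hB]
      cases k with
      | zero =>
        rw [show PySem.Chars.startswith (List.replicate 0 '#' ++ d :: r) ['#'] = false from by
          simp only [List.replicate, List.nil_append, PySem.Chars.startswith, List.isPrefixOf,
            Bool.and_eq_false_iff]
          exact Or.inl (by simp; exact fun he => hd he.symm)]
        simp
      | succ k =>
        rw [show PySem.Chars.startswith (List.replicate (k+1) '#' ++ d :: r) ['#'] = true from by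
          simp [PySem.Chars.startswith, List.replicate_succ, List.isPrefixOf]]
        rw [if_pos (⟨hlen, by rw [hget]; exact hsp⟩ :
          (k+1 : Nat) < (List.replicate (k+1) '#' ++ d :: r).length ∧
            (List.replicate (k+1) '#' ++ d :: r).getD (k+1) ' ' ≠ ' ')]
        simp

-- ===== VERDICT (by name: the statement is the Claim_ definition above) =====
theorem get_markdown_header_level_py_spec : Claim_equal_get_markdown_header_level_py := by
  intro line _
  show get_markdown_header_level_py line = get_markdown_header_level_py_alt line
  unfold get_markdown_header_level_py get_markdown_header_level_py_alt
  exact pv_core ((PySem.Str.strip line).toList)
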